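-- pv_equiv track=rewrite | github.com/SunBurst/hydroview | sites/management/commands/run_update.py | identify_time_ids
-- ===== SOURCE A (Python) =====
-- def identify_time_ids(time_id_reading_types):
--     campbell_legacy = []
--     timestamp_format = []
--     for name, type in time_id_reading_types.items():
--         if type.startswith('int_'):
--             campbell_legacy.append(type)
--         elif type.startswith('timestamp_'):
--             timestamp_format.append((type))
--         else:
--             return '', -1
--     if (len(campbell_legacy) == len(time_id_reading_types)):
--         return 'Campbell-Legacy', 0
--     elif (len(timestamp_format) == len(time_id_reading_types)):
--         return 'Timestamp', 0
--     else:
--         return '', -1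
-- ===== SOURCE B (Python) =====
-- def identify_time_ids(time_id_reading_types):
--     values = time_id_reading_types.values()
--     if all(t.startswith('int_') for t in values):
--         return 'Campbell-Legacy', 0
--     if all(t.startswith('timestamp_') for t in values):
--         return 'Timestamp', 0
--     return '', -1
-- ===== Notes on version B (the rewrite author's own statement) =====
-- stated objective: simpler
-- what changed: Replaced the two accumulator lists and length comparisons with direct all() predicates over the dict values (all 'int_' -> Campbell-Legacy, all 'timestamp_' -> Timestamp, otherwise '', -1).
import Mathlib
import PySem

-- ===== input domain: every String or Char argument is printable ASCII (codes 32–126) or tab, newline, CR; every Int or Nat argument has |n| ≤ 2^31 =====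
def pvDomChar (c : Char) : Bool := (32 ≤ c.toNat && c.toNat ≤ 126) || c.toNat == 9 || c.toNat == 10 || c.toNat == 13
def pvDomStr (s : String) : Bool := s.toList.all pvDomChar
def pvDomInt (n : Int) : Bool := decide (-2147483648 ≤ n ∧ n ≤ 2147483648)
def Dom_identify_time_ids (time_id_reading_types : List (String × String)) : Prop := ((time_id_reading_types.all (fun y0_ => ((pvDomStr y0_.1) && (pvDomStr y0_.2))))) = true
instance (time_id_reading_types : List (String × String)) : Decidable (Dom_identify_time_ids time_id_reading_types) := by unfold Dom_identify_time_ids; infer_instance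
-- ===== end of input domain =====

-- B replaces A's accumulate-into-two-lists-then-compare-lengths strategy with whole-collection
-- all() predicates over the dict values (objective: simpler).


-- ===== PORT A =====
-- the for-loop over .items() with the two accumulator lists
def identifyLoopA (items : List (String × String)) (campbell_legacy timestamp_format : List String)
    (n : Nat) : String × Int :=
  match items with
  | [] =>
    if campbell_legacy.length = n then ("Campbell-Legacy", 0)
    else if timestamp_format.length = n then ("Timestamp", 0)
    else ("", -1)
  | (_, t) :: rest =>
    if PySem.Str.startswith t "int_" then
      identifyLoopA rest (campbell_legacy ++ [t]) timestamp_format n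
    else if PySem.Str.startswith t "timestamp_" then
      identifyLoopA rest campbell_legacy (timestamp_format ++ [t]) n
    else ("", -1)

def identify_time_ids (time_id_reading_types : List (String × String)) : String × Int :=
  let d := PySem.Dict.ofList time_id_reading_types
  identifyLoopA d.items [] [] d.size

-- ===== PORT B =====
def identify_time_ids_alt (time_id_reading_types : List (String × String)) : String × Int :=
  let values := (PySem.Dict.ofList time_id_reading_types).values
  if values.all (fun t => PySem.Str.startswith t "int_") then ("Campbell-Legacy", 0)
  else if values.all (fun t => PySem.Str.startswith t "timestamp_") then ("Timestamp", 0)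
  else ("", -1)

-- ===== PRECONDITION & SPEC =====
def Spec_identify_time_ids (time_id_reading_types : List (String × String)) (out : String × Int) : Prop := out = identify_time_ids_alt time_id_reading_types
instance (time_id_reading_types : List (String × String)) (out : String × Int) : Decidable (Spec_identify_time_ids time_id_reading_types out) := by unfold Spec_identify_time_ids; infer_instance

-- ===== CLAIM (what is proved, stated in full; the proofs are below) =====
def Claim_equal_identify_time_ids : Prop := ∀ (time_id_reading_types : List (String × String)), Dom_identify_time_ids time_id_reading_types → Spec_identify_time_ids time_id_reading_types (identify_time_ids time_id_reading_types)

-- ===== LEMMAS AND PROOFS =====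

-- no string starts with both 'int_' and 'timestamp_'
lemma not_both_prefixes (t : String) (h1 : PySem.Str.startswith t "int_" = true)
    (h2 : PySem.Str.startswith t "timestamp_" = true) : False := by
  simp only [PySem.Str.startswith_eq] at h1 h2
  rw [PySem.Chars.startswith_iff] at h1 h2
  obtain ⟨u, hu⟩ := h1
  obtain ⟨v, hv⟩ := h2
  rw [← hv] at hu
  simp at hu

-- invariant characterisation of A's loop
lemma identifyLoopA_spec (items : List (String × String)) (cl ts : List String) :
    identifyLoopA items cl ts (cl.length + ts.length + items.length) =
      (if (items.all (fun p => PySem.Str.startswith p.2 "int_")) && ts.isEmpty then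
        ("Campbell-Legacy", 0)
      else if (items.all (fun p => PySem.Str.startswith p.2 "timestamp_")) && cl.isEmpty then
        ("Timestamp", 0)
      else ("", -1)) := by
  induction items generalizing cl ts with
  | nil =>
    simp only [identifyLoopA, List.all_nil, Bool.true_and, List.length_nil, Nat.add_zero,
      List.isEmpty_iff]
    by_cases hts : ts = []
    · simp [hts]
    · have h1 : ¬ cl.length = cl.length + ts.length := by
        have := List.length_pos_of_ne_nil hts; omega
      by_cases hcl : cl = []
      · have hl := List.length_pos_of_ne_nil hts
        simp [hts, hcl]
        omega
      · simp [hts, hcl]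
  | cons p rest ih =>
    obtain ⟨k, t⟩ := p
    simp only [identifyLoopA]
    by_cases h1 : PySem.Str.startswith t "int_" = true
    · have h2 : PySem.Str.startswith t "timestamp_" = false := by
        by_contra h; exact not_both_prefixes t h1 (by simpa using h)
      have harg : cl.length + ts.length + (rest.length + 1)
          = (cl ++ [t]).length + ts.length + rest.length := by simp; omega
      simp only [List.length_cons, List.all_cons, h1, h2, Bool.true_and, Bool.false_and,
        harg, ih (cl ++ [t]) ts]
      simp
    · by_cases h2 : PySem.Str.startswith t "timestamp_" = true
      · have harg : cl.length + ts.length + (rest.length + 1)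
            = cl.length + (ts ++ [t]).length + rest.length := by simp; omega
        have h1' : PySem.Str.startswith t "int_" = false := Bool.eq_false_iff.mpr h1
        simp only [List.length_cons, List.all_cons, h1', h2, Bool.true_and, Bool.false_and,
          harg, ih cl (ts ++ [t])]
        simp
      · have h1' : PySem.Str.startswith t "int_" = false := Bool.eq_false_iff.mpr h1
        have h2' : PySem.Str.startswith t "timestamp_" = false := Bool.eq_false_iff.mpr h2
        simp only [List.all_cons, h1', h2', Bool.false_and, Bool.false_eq_true, if_false]

-- ===== VERDICT (by name: the statement is the Claim_ definition above) =====
theorem identify_time_ids_spec : Claim_equal_identify_time_ids := by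
  intro xs _
  show identify_time_ids xs = identify_time_ids_alt xs
  unfold identify_time_ids identify_time_ids_alt
  simp only []
  have hsize : (PySem.Dict.ofList xs).size
      = ([] : List String).length + ([] : List String).length
        + (PySem.Dict.ofList xs).items.length := by
    simp [PySem.Dict.size]
  rw [hsize, identifyLoopA_spec]
  have hv : (PySem.Dict.ofList xs).values = (PySem.Dict.ofList xs).items.map (·.2) := by
    simp [PySem.Dict.values]
  have hall : ∀ (p : String → Bool),
      (List.map (fun x => x.2) (PySem.Dict.ofList xs).items).all p
        = (PySem.Dict.ofList xs).items.all (fun x => p x.2) := by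
    intro p; simp [List.all_map, Function.comp_def]
  simp only [hv, hall, List.isEmpty_nil, Bool.and_true]
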